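-- pv_equiv track=rewrite | github.com/DawidGurdzinski2/EKG_Analyzer | EKG/Projekt/Algorithms.py | getBoundarypoints
-- ===== SOURCE A (Python) =====
-- def getBoundarypoints(indexArray):
--     windowStartPoints=[]
--     windowStartPoints.append(indexArray[0])
--     start=indexArray[0]
--     for i in range(len(indexArray)-1):
--         if((indexArray[i+1]-indexArray[i])>2):
--             windowStartPoints.append(indexArray[i])
--             windowStartPoints.append(indexArray[i+1])
--     windowStartPoints.append(indexArray[-1])
--
--     return windowStartPoints
-- ===== SOURCE B (Python) =====
-- def getBoundarypoints(indexArray):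
--     # Group the indices into maximal runs whose consecutive gaps are <= 2,
--     # then emit each run's two endpoints.
--     runs = []
--     cur = [indexArray[0]]
--     for x in indexArray[1:]:
--         if x - cur[-1] > 2:
--             runs.append(cur)
--             cur = [x]
--         else:
--             cur.append(x)
--     runs.append(cur)
--     out = []
--     for r in runs:
--         out.append(r[0])
--         out.append(r[-1])
--     return out
-- ===== Notes on version B (the rewrite author's own statement) =====
-- stated objective: alternative
-- what changed: B groups the indices into maximal runs whose consecutive gaps are <= 2 (a list-of-runs data structure built by an accumulator scan), then emits the first and last element of each run, instead of A's single indexed scan that appends both sides of each gap.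
import Mathlib
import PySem

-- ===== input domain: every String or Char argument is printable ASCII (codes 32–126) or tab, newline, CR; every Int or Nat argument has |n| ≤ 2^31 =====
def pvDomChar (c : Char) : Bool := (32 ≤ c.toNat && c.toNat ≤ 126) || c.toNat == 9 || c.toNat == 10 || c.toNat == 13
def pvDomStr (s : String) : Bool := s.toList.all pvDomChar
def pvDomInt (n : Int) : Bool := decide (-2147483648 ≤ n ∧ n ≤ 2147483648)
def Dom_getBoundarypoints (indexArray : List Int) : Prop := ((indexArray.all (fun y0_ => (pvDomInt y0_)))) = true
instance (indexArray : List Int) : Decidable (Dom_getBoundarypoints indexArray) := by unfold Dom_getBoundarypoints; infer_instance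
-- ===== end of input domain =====

-- B groups the indices into maximal runs with consecutive gaps <= 2 and emits each run's
-- endpoints, instead of A's indexed scan appending both sides of each gap; equal on nonempty
-- lists (A raises IndexError on []).

-- ===== PORT A =====
def getBoundarypoints (indexArray : List Int) : List Int :=
  let w : List Int := []
  let w := w ++ [PySem.List.pyGetD indexArray 0 0]
  let w := (PySem.List.pyRange 0 ((indexArray.length : Int) - 1) 1).foldl
    (fun acc i =>
      if PySem.List.pyGetD indexArray (i + 1) 0 - PySem.List.pyGetD indexArray i 0 > 2 then
        acc ++ [PySem.List.pyGetD indexArray i 0, PySem.List.pyGetD indexArray (i + 1) 0]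
      else acc) w
  w ++ [PySem.List.pyGetD indexArray (-1) 0]

-- ===== PORT B =====
-- the grouping loop of Source B: state = (runs, cur), one step per element of indexArray[1:]
def pvGroup (runs : List (List Int)) (cur : List Int) : List Int → List (List Int)
  | [] => runs ++ [cur]
  | x :: xs =>
    if x - PySem.List.pyGetD cur (-1) 0 > 2 then
      pvGroup (runs ++ [cur]) [x] xs
    else
      pvGroup runs (cur ++ [x]) xs

def getBoundarypoints_alt (indexArray : List Int) : List Int :=
  let runs := pvGroup [] [PySem.List.pyGetD indexArray 0 0]
    (PySem.List.slice indexArray (some 1) none)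
  runs.foldl (fun acc r => acc ++ [PySem.List.pyGetD r 0 0, PySem.List.pyGetD r (-1) 0]) []

-- ===== PRECONDITION & SPEC =====
-- A raises IndexError on the empty list (indexArray[0]); so does B.
def Pre_getBoundarypoints (indexArray : List Int) : Prop := indexArray ≠ []
instance (indexArray : List Int) : Decidable (Pre_getBoundarypoints indexArray) := by
  unfold Pre_getBoundarypoints; infer_instance
def pvWitness_getBoundarypoints : List Int := [1, 2, 7, 8]

def Spec_getBoundarypoints (indexArray : List Int) (out : List Int) : Prop := out = getBoundarypoints_alt indexArray
instance (indexArray : List Int) (out : List Int) : Decidable (Spec_getBoundarypoints indexArray out) := by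
  unfold Spec_getBoundarypoints; infer_instance

-- ===== CLAIM (what is proved, stated in full; the proofs are below) =====
def Claim_equal_getBoundarypoints : Prop := ∀ (indexArray : List Int), Dom_getBoundarypoints indexArray → Pre_getBoundarypoints indexArray → Spec_getBoundarypoints indexArray (getBoundarypoints indexArray)

-- ===== LEMMAS AND PROOFS =====
-- common middle form: endpoints around each gap > 2, followed by the last element
def pvMid (p : Int) : List Int → List Int
  | [] => [p]
  | q :: t => (if q - p > 2 then [p, q] else []) ++ pvMid q t

-- emission of B's second loop, as flatMap
def pvEmit (runs : List (List Int)) : List Int :=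
  runs.flatMap (fun r => [PySem.List.pyGetD r 0 0, PySem.List.pyGetD r (-1) 0])

theorem pvGroup_emit (rest : List Int) : ∀ (runs : List (List Int)) (c0 : Int) (cur' : List Int),
    pvEmit (pvGroup runs (c0 :: cur') rest)
      = pvEmit runs ++ [c0] ++ pvMid ((c0 :: cur').getLast (by simp)) rest := by
  induction rest with
  | nil =>
    intro runs c0 cur'
    simp [pvGroup, pvEmit, pvMid, PySem.List.pyGetD_zero_cons,
      PySem.List.pyGetD_neg_one (c0 :: cur') 0 (by simp)]
  | cons x xs ih =>
    intro runs c0 cur'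
    simp only [pvGroup, PySem.List.pyGetD_neg_one (c0 :: cur') 0 (by simp)]
    by_cases h : x - (c0 :: cur').getLast (by simp) > 2
    · rw [if_pos h, ih (runs ++ [c0 :: cur']) x []]
      simp [pvEmit, pvMid, h, PySem.List.pyGetD_zero_cons,
        PySem.List.pyGetD_neg_one (c0 :: cur') 0 (by simp), List.getLast_singleton]
    · rw [if_neg h]
      have hc : (c0 :: cur') ++ [x] = c0 :: (cur' ++ [x]) := by simp
      rw [hc, ih runs c0 (cur' ++ [x])]
      simp [pvMid, h]

-- A's indexed scan equals a fold over consecutive pairs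
theorem pvA_fold_pairs (xs : List Int) (init : List Int) :
    (PySem.List.pyRange 0 ((xs.length : Int) - 1) 1).foldl
      (fun acc i =>
        if PySem.List.pyGetD xs (i + 1) 0 - PySem.List.pyGetD xs i 0 > 2 then
          acc ++ [PySem.List.pyGetD xs i 0, PySem.List.pyGetD xs (i + 1) 0]
        else acc) init
    = (xs.zip xs.tail).foldl
      (fun acc pq => if pq.2 - pq.1 > 2 then acc ++ [pq.1, pq.2] else acc) init := by
  have hlen : ((xs.zip xs.tail).length : Int) = (xs.length : Int) - 1 ∨ xs = [] := by
    cases xs with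
    | nil => right; rfl
    | cons a t => left; simp [List.length_zip]
  rcases hlen with h | h
  · rw [← h]
    rw [← PySem.List.foldl_pyRange_zero_pyGetD' (xs.zip xs.tail) ((0 : Int), (0 : Int))
      (fun acc pq => if pq.2 - pq.1 > 2 then acc ++ [pq.1, pq.2] else acc) init]
    apply PySem.List.foldl_congr_mem
    intro acc i hi
    rw [PySem.List.mem_pyRange_one] at hi
    have h0 : 0 ≤ i := hi.1
    have h1 : i < ((xs.zip xs.tail).length : Int) := hi.2
    have hxs : i < (xs.length : Int) - 1 := by rw [h] at h1; exact h1
    have hi1 : i.toNat < xs.length := by omega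
    have hi2 : i.toNat + 1 < xs.length := by omega
    have hz : i.toNat < (xs.zip xs.tail).length := by omega
    rw [PySem.List.pyGetD_eq_getElem xs (i := i) 0 h0 (by omega),
        PySem.List.pyGetD_eq_getElem xs (i := i + 1) 0 (by omega) (by omega),
        PySem.List.pyGetD_eq_getElem (xs.zip xs.tail) (i := i) ((0 : Int), (0 : Int)) h0 (by exact_mod_cast h1)]
    have hfst : ((xs.zip xs.tail)[i.toNat]'hz).1 = xs[i.toNat]'hi1 := by
      simp [List.getElem_zip]
    have hsnd : ((xs.zip xs.tail)[i.toNat]'hz).2 = xs.tail[i.toNat]'(by simpa [List.length_tail] using (by omega : i.toNat < xs.length - 1)) := by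
      simp [List.getElem_zip]
    have htail : xs.tail[i.toNat]'(by simpa [List.length_tail] using (by omega : i.toNat < xs.length - 1)) = xs[i.toNat + 1]'hi2 := by
      simp [List.getElem_tail]
    have hcast : (i + 1).toNat = i.toNat + 1 := by omega
    simp only [hcast, hfst, hsnd, htail]
  · subst h; rfl
theorem pv_pairs_mid (t : List Int) : ∀ (p : Int) (acc : List Int),
    ((p :: t).zip t).foldl
      (fun acc pq => if pq.2 - pq.1 > 2 then acc ++ [pq.1, pq.2] else acc) acc
      ++ [(p :: t).getLast (by simp)]
    = acc ++ pvMid p t := by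
  induction t with
  | nil => intro p acc; simp [pvMid]
  | cons q t' ih =>
    intro p acc
    simp only [List.zip_cons_cons, List.foldl_cons]
    have hlast : (p :: q :: t').getLast (by simp) = (q :: t').getLast (by simp) := by
      simp [List.getLast_cons]
    rw [hlast, ih q]
    by_cases h : q - p > 2 <;> simp [pvMid, h]

-- ===== VERDICT (by name: the statement is the Claim_ definition above) =====
theorem getBoundarypoints_spec : Claim_equal_getBoundarypoints := by
  intro xs _ hpre
  unfold Spec_getBoundarypoints getBoundarypoints getBoundarypoints_alt
  cases xs with
  | nil => exact absurd rfl hpre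
  | cons x0 t =>
    simp only
    rw [PySem.List.foldl_append_eq_flatMap]
    show _ = pvEmit (pvGroup [] [PySem.List.pyGetD (x0 :: t) 0 0]
      (PySem.List.slice (x0 :: t) (some 1) none))
    rw [PySem.List.slice_from_one, PySem.List.pyGetD_zero_cons]
    simp only [List.tail_cons]
    rw [pvGroup_emit t [] x0 []]
    rw [pvA_fold_pairs (x0 :: t)]
    rw [PySem.List.pyGetD_neg_one (x0 :: t) 0 (by simp)]
    have := pv_pairs_mid t x0 ([] ++ [x0])
    simpa [pvEmit, List.getLast_singleton] using this
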